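-- pv_equiv track=rewrite | github.com/python-romania/hackerrank | claudiuiova/algorithms/implementation/magic_square_forming.py | calculate_sums
-- ===== SOURCE A (Python) =====
-- def calculate_sums(s):
--     lines_sum = []
--     columns_sum = []
--     primary_diagonal_sum = 0
--     secondary_diagonal_sum = 0
--
--     for idx, i in enumerate(s):
--         lines_sum.append(sum(i))
--         primary_diagonal_sum += s[idx][idx]
--         secondary_diagonal_sum += s[idx][len(s) - idx - 1]
--         columns_sum.append(sum([s[x][idx] for x in range(len(s))]))
--
--     return lines_sum, columns_sum, primary_diagonal_sum, secondary_diagonal_sum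
-- ===== SOURCE B (Python) =====
-- def calculate_sums(s):
--     n = len(s)
--     columns_sum = [0] * n
--     for row in s:
--         columns_sum = [c + v for c, v in zip(columns_sum, row)]
--     lines_sum = [sum(row) for row in s]
--     primary_diagonal_sum = sum(s[i][i] for i in range(n))
--     secondary_diagonal_sum = sum(s[i][n - 1 - i] for i in range(n))
--     return lines_sum, columns_sum, primary_diagonal_sum, secondary_diagonal_sum
-- ===== Notes on version B (the rewrite author's own statement) =====
-- stated objective: alternative
-- what changed: A builds all four results in one enumerate loop with an inner per-column rescan of the whole matrix; B is staged: column sums come from a single zip-accumulating sweep, row sums from a comprehension, and each diagonal from its own direct range-sum, eliminating the inner rescan.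
-- outside the precondition, e.g. on calculate_sums([[1, 2], [3]]): A raises IndexError, B raises IndexError
import Mathlib
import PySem

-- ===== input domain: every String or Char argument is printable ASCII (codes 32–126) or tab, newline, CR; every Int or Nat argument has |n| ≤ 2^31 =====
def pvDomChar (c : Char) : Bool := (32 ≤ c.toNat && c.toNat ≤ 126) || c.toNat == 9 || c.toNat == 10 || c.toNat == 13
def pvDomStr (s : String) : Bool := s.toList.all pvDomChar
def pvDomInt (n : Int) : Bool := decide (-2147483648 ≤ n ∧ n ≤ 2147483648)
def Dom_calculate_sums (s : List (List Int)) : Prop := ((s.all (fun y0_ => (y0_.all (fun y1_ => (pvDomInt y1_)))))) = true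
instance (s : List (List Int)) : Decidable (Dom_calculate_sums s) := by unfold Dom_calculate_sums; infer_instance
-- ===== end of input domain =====

-- B replaces A's single enumerate loop with inner per-column rescans by four single-purpose
-- passes: a zip-accumulating column sweep, a row-sum comprehension and two direct diagonal sums.

-- ===== PORT A =====
def calculate_sums (s : List (List Int)) : List Int × List Int × Int × Int :=
  (PySem.List.enumerate s 0).foldl
    (fun (acc : List Int × List Int × Int × Int) (p : Int × List Int) =>
      (acc.1 ++ [p.2.sum],
       acc.2.1 ++ [((PySem.List.pyRange 0 (PySem.List.len s) 1).map
          (fun x => PySem.List.pyGetD (PySem.List.pyGetD s x []) p.1 0)).sum],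
       acc.2.2.1 + PySem.List.pyGetD (PySem.List.pyGetD s p.1 []) p.1 0,
       acc.2.2.2 + PySem.List.pyGetD (PySem.List.pyGetD s p.1 []) (PySem.List.len s - p.1 - 1) 0))
    ([], [], 0, 0)

-- ===== PORT B =====
def calculate_sums_alt (s : List (List Int)) : List Int × List Int × Int × Int :=
  let n : Int := PySem.List.len s
  -- for row in s: columns_sum = [c + v for c, v in zip(columns_sum, row)]
  let columns_sum : List Int :=
    s.foldl (fun c row => List.zipWith (fun a b => a + b) c row) (List.replicate s.length 0)
  -- lines_sum = [sum(row) for row in s]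
  let lines_sum : List Int := s.map (fun row => row.sum)
  -- primary = sum(s[i][i] for i in range(n))
  let primary : Int := ((PySem.List.pyRange 0 n 1).map
      (fun i => PySem.List.pyGetD (PySem.List.pyGetD s i []) i 0)).sum
  -- secondary = sum(s[i][n-1-i] for i in range(n))
  let secondary : Int := ((PySem.List.pyRange 0 n 1).map
      (fun i => PySem.List.pyGetD (PySem.List.pyGetD s i []) (n - 1 - i) 0)).sum
  (lines_sum, columns_sum, primary, secondary)

-- ===== PRECONDITION & SPEC =====
-- Pre_ excludes exactly the ragged matrices (some row shorter than the matrix height) on which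
-- the Python A raises IndexError while indexing columns/diagonals.
def Pre_calculate_sums (s : List (List Int)) : Prop := ∀ row ∈ s, s.length ≤ row.length
instance (s : List (List Int)) : Decidable (Pre_calculate_sums s) := by unfold Pre_calculate_sums; infer_instance
def pvWitness_calculate_sums : List (List Int) := [[1, 2], [3, 4]]
def Spec_calculate_sums (s : List (List Int)) (out : List Int × List Int × Int × Int) : Prop := out = calculate_sums_alt s
instance (s : List (List Int)) (out : List Int × List Int × Int × Int) : Decidable (Spec_calculate_sums s out) := by unfold Spec_calculate_sums; infer_instance

-- ===== CLAIM =====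
def Claim_equal_calculate_sums : Prop := ∀ (s : List (List Int)), Dom_calculate_sums s → Pre_calculate_sums s → Spec_calculate_sums s (calculate_sums s)

-- ===== LEMMAS AND PROOFS =====

-- a loop with four independent accumulators is four loops
theorem foldl_prod4 {α β γ δ ε : Type} (l : List α) (f1 : β → α → β) (f2 : γ → α → γ)
    (f3 : δ → α → δ) (f4 : ε → α → ε) (b : β) (c : γ) (d : δ) (e : ε) :
    l.foldl (fun acc p => (f1 acc.1 p, f2 acc.2.1 p, f3 acc.2.2.1 p, f4 acc.2.2.2 p)) (b, c, d, e)
      = (l.foldl f1 b, l.foldl f2 c, l.foldl f3 d, l.foldl f4 e) := by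
  induction l generalizing b c d e with
  | nil => rfl
  | cons x xs ih => simpa using ih (f1 b x) (f2 c x) (f3 d x) (f4 e x)

-- [0]*n as a comprehension over range(n)
theorem replicate_eq_map_pyRange (n : Nat) :
    List.replicate n (0 : Int) = (PySem.List.pyRange 0 (n : Int) 1).map (fun _ => 0) := by
  symm
  rw [List.eq_replicate_iff]
  constructor
  · simp [PySem.List.length_pyRange_one]
  · intro b hb
    simp at hb
    exact hb.2

-- one zipWith step on a range-comprehension accumulator, row long enough
theorem zipWith_map_pyRange (n : Nat) (f : Int → Int) (r : List Int) (hr : n ≤ r.length) :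
    List.zipWith (fun a b => a + b) ((PySem.List.pyRange 0 (n : Int) 1).map f) r
      = (PySem.List.pyRange 0 (n : Int) 1).map (fun j => f j + PySem.List.pyGetD r j 0) := by
  apply List.ext_getElem
  · simp [PySem.List.length_pyRange_one]
    omega
  · intro k h1 h2
    have hk : k < n := by
      simpa [PySem.List.length_pyRange_one] using h2
    have hkr : k < r.length := lt_of_lt_of_le hk hr
    simp only [List.getElem_zipWith, List.getElem_map, PySem.List.getElem_pyRange_one, zero_add]
    rw [PySem.List.pyGetD_natCast, List.getD_eq_getElem?_getD, List.getElem?_eq_getElem hkr]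
    rfl

-- B's zip-accumulating column sweep, characterised
theorem colsB_inv (n : Nat) (rows : List (List Int)) (hrows : ∀ r ∈ rows, n ≤ r.length)
    (f : Int → Int) :
    rows.foldl (fun c row => List.zipWith (fun a b => a + b) c row)
        ((PySem.List.pyRange 0 (n : Int) 1).map f)
      = (PySem.List.pyRange 0 (n : Int) 1).map
          (fun j => f j + (rows.map (fun r => PySem.List.pyGetD r j 0)).sum) := by
  induction rows generalizing f with
  | nil => simp
  | cons r rs ih =>
    simp only [List.foldl_cons]
    rw [zipWith_map_pyRange n f r (hrows r (by simp)),
        ih (fun r' hr' => hrows r' (by simp [hr'])) (fun j => f j + PySem.List.pyGetD r j 0)]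
    simp [add_assoc]

-- ===== VERDICT =====
theorem calculate_sums_spec : Claim_equal_calculate_sums := by
  intro s _ hpre
  show calculate_sums s = calculate_sums_alt s
  rw [calculate_sums, calculate_sums_alt]
  rw [foldl_prod4 (PySem.List.enumerate s 0)
        (fun a (p : Int × List Int) => a ++ [p.2.sum])
        (fun c (p : Int × List Int) => c ++ [((PySem.List.pyRange 0 (PySem.List.len s) 1).map
          (fun x => PySem.List.pyGetD (PySem.List.pyGetD s x []) p.1 0)).sum])
        (fun d (p : Int × List Int) => d + PySem.List.pyGetD (PySem.List.pyGetD s p.1 []) p.1 0)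
        (fun e (p : Int × List Int) => e + PySem.List.pyGetD (PySem.List.pyGetD s p.1 []) (PySem.List.len s - p.1 - 1) 0)
        [] [] 0 0]
  -- lines
  have h1 : (PySem.List.enumerate s 0).foldl
      (fun a (p : Int × List Int) => a ++ [p.2.sum]) []
      = s.map (fun row => row.sum) := by
    rw [PySem.List.foldl_append_singleton_eq_map (fun p : Int × List Int => p.2.sum)]
    rw [List.nil_append, show (fun p : Int × List Int => p.2.sum)
        = (fun row : List Int => row.sum) ∘ (fun p : Int × List Int => p.2) from rfl]
    rw [← List.map_map, PySem.List.map_snd_enumerate]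
  -- columns
  have h2 : (PySem.List.enumerate s 0).foldl
      (fun c (p : Int × List Int) => c ++ [((PySem.List.pyRange 0 (PySem.List.len s) 1).map
        (fun x => PySem.List.pyGetD (PySem.List.pyGetD s x []) p.1 0)).sum]) []
      = s.foldl (fun c row => List.zipWith (fun a b => a + b) c row)
          (List.replicate s.length 0) := by
    rw [PySem.List.foldl_append_singleton_eq_map
        (fun p : Int × List Int => ((PySem.List.pyRange 0 (PySem.List.len s) 1).map
          (fun x => PySem.List.pyGetD (PySem.List.pyGetD s x []) p.1 0)).sum),
        List.nil_append,
        PySem.List.enumerate_eq_map_pyRange s ([] : List Int), List.map_map,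
        replicate_eq_map_pyRange s.length,
        colsB_inv s.length s hpre (fun _ => 0)]
    simp only [PySem.List.len_eq]
    apply List.map_congr_left
    intro j _
    simp only [Function.comp_apply, zero_add]
    congr 1
    conv_lhs => rw [show (fun x => PySem.List.pyGetD (PySem.List.pyGetD s x []) j 0)
        = (fun r : List Int => PySem.List.pyGetD r j 0) ∘ (fun x => PySem.List.pyGetD s x []) from rfl,
      ← List.map_map, PySem.List.map_pyGetD_pyRange_zero' s ([] : List Int)]
  -- diagonals
  have h3 : (PySem.List.enumerate s 0).foldl
      (fun d (p : Int × List Int) => d + PySem.List.pyGetD (PySem.List.pyGetD s p.1 []) p.1 0) 0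
      = ((PySem.List.pyRange 0 (PySem.List.len s) 1).map
          (fun i => PySem.List.pyGetD (PySem.List.pyGetD s i []) i 0)).sum := by
    rw [PySem.List.foldl_add (PySem.List.enumerate s 0)
        (fun p : Int × List Int => PySem.List.pyGetD (PySem.List.pyGetD s p.1 []) p.1 0) 0,
        zero_add, PySem.List.enumerate_eq_map_pyRange s ([] : List Int), List.map_map]
    simp only [PySem.List.len_eq]
    rfl
  have h4 : (PySem.List.enumerate s 0).foldl
      (fun e (p : Int × List Int) => e + PySem.List.pyGetD (PySem.List.pyGetD s p.1 [])
        (PySem.List.len s - p.1 - 1) 0) 0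
      = ((PySem.List.pyRange 0 (PySem.List.len s) 1).map
          (fun i => PySem.List.pyGetD (PySem.List.pyGetD s i []) (PySem.List.len s - 1 - i) 0)).sum := by
    rw [PySem.List.foldl_add (PySem.List.enumerate s 0)
        (fun p : Int × List Int => PySem.List.pyGetD (PySem.List.pyGetD s p.1 [])
          (PySem.List.len s - p.1 - 1) 0) 0,
        zero_add, PySem.List.enumerate_eq_map_pyRange s ([] : List Int), List.map_map]
    apply congrArg List.sum
    apply List.map_congr_left
    intro i _
    simp only [Function.comp_apply]
    ring_nf
  rw [h1, h2, h3, h4]
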